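-- pv_equiv track=rewrite | github.com/nmeusling/advent-of-code-2023 | src/day14/day14.py | analyze_rock_maps
-- ===== SOURCE A (Python) =====
-- from copy import copy
-- from enum import Enum
--
-- class Directions(Enum):
--     NORTH=1
--     SOUTH=2
--     EAST=3
--     WEST=4
--
-- def tilt_rocks_to_direction(rock_map, direction: Directions):
--     vertical = direction in [Directions.NORTH, Directions.SOUTH]
--     positive = direction in [Directions.NORTH, Directions.WEST]
--     tilted = []
--     if vertical:
--         new_columns = []
--         for column in range(len(rock_map[0])):
--             column_map = ''.join([rock_map[row][column] for row in range(len(rock_map))])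
--             new_columns.append(move_rocks_in_column_segments(column_map, positive))
--         for row in range(len(rock_map)):
--             new_row = ''.join([new_columns[column][row] for column in range(len(new_columns))])
--             tilted.append(new_row)
--     else:
--         for row in rock_map:
--             new_row = move_rocks_in_column_segments(row, positive)
--             tilted.append(new_row)
--     return tilted
--
-- def complete_tilt_cycles(rock_map, cycles):
--     current_map = copy(rock_map)
--     for i in range(cycles):
--         current_map = tilt_rocks_to_direction(current_map, Directions.NORTH)
--         current_map = tilt_rocks_to_direction(current_map, Directions.WEST)
--         current_map = tilt_rocks_to_direction(current_map, Directions.SOUTH)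
--         current_map = tilt_rocks_to_direction(current_map, Directions.EAST)
--     return current_map
--
-- def move_rocks_in_column_segments(column: str, positive: bool = True):
--     segments = column.split('#')
--     new_segments = []
--     for segment in segments:
--         new_segments.append(move_rocks_in_segment(segment, positive))
--     return '#'.join(new_segments)
--
-- def move_rocks_in_segment(segment: str, positive: bool = True):
--     spaces = len(segment)
--     rock_count = count_rocks_in_segment(segment)
--     if positive:
--         return 'O'*rock_count + '.'*(spaces-rock_count)
--     return '.' * (spaces - rock_count) + 'O' * rock_count
--
-- def count_rocks_in_segment(segment: str):
--     rock_count = 0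
--     for space in segment:
--         if space == 'O':
--             rock_count += 1
--     return rock_count
--
-- def calculate_load(rock_map):
--     rows = len(rock_map)
--     load = 0
--     for i, row in enumerate(rock_map):
--         load_contribution = rows - i
--         num_rocks = count_rocks_in_segment(row)
--         load += num_rocks*load_contribution
--     return load
--
-- def analyze_rock_maps(rock_map):
--     new_map = copy(rock_map)
--     rock_maps = []
--     first_index = 0
--     cycle = 0
--     for i in range(1000):
--         new_map = complete_tilt_cycles(new_map, 1)
--         if new_map in rock_maps:
--             first_index = rock_maps.index(new_map)
--             cycle = i - first_index
--             break
--         rock_maps.append(new_map)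
--     additional_cycles = (1000000000 - i-1)%cycle
--     new_map = complete_tilt_cycles(new_map, additional_cycles)
--     return calculate_load(new_map)
-- ===== SOURCE B (Python) =====
-- # B: Floyd tortoise-and-hare cycle detection on the tilt-cycle orbit (O(1) memory,
-- # no stored history, no list membership scans), then a modular jump to 1e9 cycles.
--
-- def _shift_segment(segment, positive):
--     k = segment.count('O')
--     dots = '.' * (len(segment) - k)
--     return 'O' * k + dots if positive else dots + 'O' * k
--
-- def _tilt_line(line, positive):
--     return '#'.join(_shift_segment(seg, positive) for seg in line.split('#'))
--
-- def _tilt(rock_map, vertical, positive):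
--     if not vertical:
--         return [_tilt_line(row, positive) for row in rock_map]
--     cols = [''.join(rock_map[r][c] for r in range(len(rock_map)))
--             for c in range(len(rock_map[0]))]
--     new_cols = [_tilt_line(col, positive) for col in cols]
--     return [''.join(new_cols[c][r] for c in range(len(new_cols)))
--             for r in range(len(rock_map))]
--
-- def _cycle(rock_map):
--     m = _tilt(rock_map, True, True)    # north
--     m = _tilt(m, False, True)          # west
--     m = _tilt(m, True, False)          # south
--     return _tilt(m, False, False)      # east
--
-- def _load(rock_map):
--     rows = len(rock_map)
--     return sum(row.count('O') * (rows - i) for i, row in enumerate(rock_map))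
--
-- def analyze_rock_maps(rock_map):
--     slow = _cycle(rock_map)
--     fast = _cycle(_cycle(rock_map))
--     t = 1
--     while slow != fast:
--         slow = _cycle(slow)
--         fast = _cycle(_cycle(fast))
--         t += 1
--     # slow is the state after t cycles and equals the state after 2t cycles,
--     # so from cycle t on the orbit is periodic with period (a divisor of) t.
--     for _ in range((1000000000 - t) % t):
--         slow = _cycle(slow)
--     return _load(slow)
-- ===== Notes on version B (the rewrite author's own statement) =====
-- stated objective: alternative
-- what changed: B replaces A's stored-history cycle detection (keeping every seen map in a list, testing membership with 'in' and '.index', then re-simulating the remainder) by Floyd's tortoise-and-hare: two pointers advancing at speeds 1 and 2 meet at a step t with state(t)=state(2t) using O(1) memory and no history list, after which a single modular jump (1000000000-t)%t of extra cycles lands on the state after 10^9 cycles.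
import Mathlib
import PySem

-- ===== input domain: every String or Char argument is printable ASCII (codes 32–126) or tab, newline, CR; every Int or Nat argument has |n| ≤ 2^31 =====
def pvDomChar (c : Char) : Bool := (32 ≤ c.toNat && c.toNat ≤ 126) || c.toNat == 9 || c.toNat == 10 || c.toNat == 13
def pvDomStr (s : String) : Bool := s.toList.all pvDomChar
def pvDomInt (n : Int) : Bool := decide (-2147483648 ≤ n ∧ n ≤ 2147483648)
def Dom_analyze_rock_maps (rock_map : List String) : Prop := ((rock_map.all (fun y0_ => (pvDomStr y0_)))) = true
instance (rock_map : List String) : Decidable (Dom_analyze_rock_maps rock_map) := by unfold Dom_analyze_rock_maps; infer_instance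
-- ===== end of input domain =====

-- B replaces A's stored-history cycle detection (list membership + .index + re-simulation)
-- by Floyd's tortoise-and-hare: O(1) memory, no history, then a modular jump to 1e9 cycles.

-- ===== PORT A =====
inductive Directions | NORTH | SOUTH | EAST | WEST
deriving DecidableEq, Repr

def count_rocks_in_segment (segment : List Char) : Int :=
  segment.foldl (fun acc c => if c = 'O' then acc + 1 else acc) 0

def move_rocks_in_segment (segment : List Char) (positive : Bool) : List Char :=
  let spaces := segment.length
  let rock_count := (count_rocks_in_segment segment).toNat
  if positive then List.replicate rock_count 'O' ++ List.replicate (spaces - rock_count) '.'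
  else List.replicate (spaces - rock_count) '.' ++ List.replicate rock_count 'O'

def move_rocks_in_column_segments (column : List Char) (positive : Bool) : List Char :=
  PySem.Chars.join ['#'] ((PySem.Chars.splitOn column ['#']).map (fun seg => move_rocks_in_segment seg positive))

def tilt_rocks_to_direction (rock_map : List String) (direction : Directions) : List String :=
  let vertical := direction ∈ [Directions.NORTH, Directions.SOUTH]
  let positive := direction ∈ [Directions.NORTH, Directions.WEST]
  if vertical then
    -- rock_map[0] raises IndexError on [], rock_map[row][column] on a row shorter than row 0: excluded by Pre_
    let new_columns := (List.range ((rock_map.getD 0 "").toList).length).map (fun c =>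
      move_rocks_in_column_segments ((List.range rock_map.length).map (fun r => ((rock_map.getD r "").toList).getD c ' ')) positive)
    (List.range rock_map.length).map (fun r =>
      String.ofList ((List.range new_columns.length).map (fun c => (new_columns.getD c []).getD r ' ')))
  else rock_map.map (fun row => String.ofList (move_rocks_in_column_segments row.toList positive))

def complete_tilt_cycles (rock_map : List String) (cycles : Int) : List String :=
  (PySem.List.pyRange 0 cycles 1).foldl (fun current_map _ =>
    tilt_rocks_to_direction (tilt_rocks_to_direction (tilt_rocks_to_direction
      (tilt_rocks_to_direction current_map Directions.NORTH) Directions.WEST) Directions.SOUTH) Directions.EAST) rock_map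

def calculate_load (rock_map : List String) : Int :=
  let rows : Int := rock_map.length
  (PySem.List.enumerate rock_map 0).foldl
    (fun load p => load + count_rocks_in_segment p.2.toList * (rows - p.1)) 0

def analyzeLoopA : Nat → Int → List String → List (List String) → Int
  | 0, _, _, _ => 0  -- loop exhausted: Python raises ZeroDivisionError (cycle = 0); excluded by Pre_
  | fuel+1, i, new_map, rock_maps =>
    let nm := complete_tilt_cycles new_map 1
    if nm ∈ rock_maps then
      let first_index : Int := ((PySem.List.index? rock_maps nm).getD 0 : Nat)
      let cycle := i - first_index
      let additional_cycles := PySem.Int.mod (1000000000 - i - 1) cycle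
      calculate_load (complete_tilt_cycles nm additional_cycles)
    else analyzeLoopA fuel (i+1) nm (rock_maps ++ [nm])

def analyze_rock_maps (rock_map : List String) : Int :=
  analyzeLoopA 1000 0 rock_map []

-- ===== PORT B =====
def pvShiftSegment (segment : List Char) (positive : Bool) : List Char :=
  let k := PySem.Chars.count segment ['O']
  let dots := List.replicate (segment.length - k) '.'
  if positive then List.replicate k 'O' ++ dots else dots ++ List.replicate k 'O'

def pvTiltLine (line : List Char) (positive : Bool) : List Char :=
  PySem.Chars.join ['#'] ((PySem.Chars.splitOn line ['#']).map (fun seg => pvShiftSegment seg positive))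

def pvTilt (rock_map : List String) (vertical positive : Bool) : List String :=
  if !vertical then rock_map.map (fun row => String.ofList (pvTiltLine row.toList positive))
  else
    let cols := (List.range ((rock_map.getD 0 "").toList).length).map (fun c =>
      (List.range rock_map.length).map (fun r => ((rock_map.getD r "").toList).getD c ' '))
    let new_cols := cols.map (fun col => pvTiltLine col positive)
    (List.range rock_map.length).map (fun r =>
      String.ofList ((List.range new_cols.length).map (fun c => (new_cols.getD c []).getD r ' ')))

def pvCycle (m : List String) : List String :=
  pvTilt (pvTilt (pvTilt (pvTilt m true true) false true) true false) false false

def pvLoad (m : List String) : Int :=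
  let rows : Int := m.length
  ((PySem.List.enumerate m 0).map (fun p => (PySem.Chars.count p.2.toList ['O'] : Int) * (rows - p.1))).sum

-- Floyd's while loop, fuel-bounded (under Pre_ the hare and tortoise meet within 2000 steps,
-- so the fuel-exhausted branch is never reached on admitted inputs)
def pvFloyd : Nat → Int → List String → List String → Int × List String
  | 0, t, slow, _ => (t, slow)
  | fuel+1, t, slow, fast =>
    if slow = fast then (t, slow)
    else pvFloyd fuel (t+1) (pvCycle slow) (pvCycle (pvCycle fast))

def analyze_rock_maps_alt (rock_map : List String) : Int :=
  let slow := pvCycle rock_map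
  let fast := pvCycle (pvCycle rock_map)
  let ts := pvFloyd 2000 1 slow fast
  pvLoad ((PySem.List.pyRange 0 (PySem.Int.mod (1000000000 - ts.1) ts.1) 1).foldl
    (fun cur _ => pvCycle cur) ts.2)

-- ===== PRECONDITION & SPEC =====
def pvOrbit : Nat → List String → List (List String)
  | 0, _ => []
  | n+1, cur => pvCycle cur :: pvOrbit n (pvCycle cur)

def pvHasRepeat : List (List String) → Bool
  | [] => false
  | x :: xs => xs.contains x || pvHasRepeat xs

-- Pre_ excludes exactly the inputs where A raises: the empty map and maps whose first row is
-- longer than some other row (IndexError in the first north tilt), and maps whose tilt-cycle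
-- orbit does not repeat within 1000 cycles (ZeroDivisionError from '% cycle' with cycle = 0).
def Pre_analyze_rock_maps (rock_map : List String) : Prop :=
  rock_map ≠ [] ∧ (∀ r ∈ rock_map, ((rock_map.headD "").toList).length ≤ r.toList.length) ∧
    pvHasRepeat (pvOrbit 1000 rock_map) = true

instance (rock_map : List String) : Decidable (Pre_analyze_rock_maps rock_map) := by
  unfold Pre_analyze_rock_maps; infer_instance

def pvWitness_analyze_rock_maps : List String := ["O"]

def Spec_analyze_rock_maps (rock_map : List String) (out : Int) : Prop := out = analyze_rock_maps_alt rock_map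
instance (rock_map : List String) (out : Int) : Decidable (Spec_analyze_rock_maps rock_map out) := by unfold Spec_analyze_rock_maps; infer_instance

-- ===== CLAIM (what is proved, stated in full; the proofs are below) =====
def Claim_equal_analyze_rock_maps : Prop := ∀ (rock_map : List String), Dom_analyze_rock_maps rock_map → Pre_analyze_rock_maps rock_map → Spec_analyze_rock_maps rock_map (analyze_rock_maps rock_map)

-- ===== LEMMAS AND PROOFS =====

-- str.count with a single-character needle is the plain character count
theorem pv_countgo_single (c : Char) : ∀ (l : List Char) (fuel acc : Nat), l.length ≤ fuel →
    PySem.Chars.count.go [c] fuel l acc = acc + l.count c := by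
  intro l
  induction l with
  | nil => intro fuel acc _; cases fuel <;> simp [PySem.Chars.count.go.eq_def]
  | cons h t ih =>
    intro fuel acc hle
    cases fuel with
    | zero => simp at hle
    | succ n =>
      rw [PySem.Chars.count.go.eq_def]
      dsimp only
      by_cases hc : c = h
      · subst hc
        simp only [List.isPrefixOf, beq_self_eq_true, Bool.true_and,
          if_true, List.length_singleton, List.drop_succ_cons, List.drop_zero]
        rw [ih n (acc+1) (by simpa using hle)]
        simp
        omega
      · have hpre : ([c].isPrefixOf (h :: t)) = false := by
          simp [List.isPrefixOf]; exact hc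
        rw [hpre]
        simp only [Bool.false_eq_true, if_false]
        rw [ih n acc (by simpa using hle)]
        simp [List.count_cons]
        intro e; exact absurd e.symm hc

theorem pv_count_single (l : List Char) (c : Char) : PySem.Chars.count l [c] = l.count c := by
  rw [PySem.Chars.count]
  simp [pv_countgo_single c l l.length 0 le_rfl]

theorem pv_count_rocks_eq (l : List Char) : count_rocks_in_segment l = (l.count 'O' : Int) := by
  rw [count_rocks_in_segment, PySem.List.foldl_ite_add_one]
  simp [List.count, List.countP]
  congr 1

theorem pv_shift_eq (seg : List Char) (p : Bool) :
    pvShiftSegment seg p = move_rocks_in_segment seg p := by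
  simp [pvShiftSegment, move_rocks_in_segment, pv_count_rocks_eq, pv_count_single]

theorem pv_line_eq (l : List Char) (p : Bool) :
    pvTiltLine l p = move_rocks_in_column_segments l p := by
  simp [pvTiltLine, move_rocks_in_column_segments, pv_shift_eq]

theorem pv_tilt_N (m : List String) : pvTilt m true true = tilt_rocks_to_direction m Directions.NORTH := by
  simp [pvTilt, tilt_rocks_to_direction, pv_line_eq, Function.comp_def]
theorem pv_tilt_W (m : List String) : pvTilt m false true = tilt_rocks_to_direction m Directions.WEST := by
  simp [pvTilt, tilt_rocks_to_direction, pv_line_eq]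
theorem pv_tilt_S (m : List String) : pvTilt m true false = tilt_rocks_to_direction m Directions.SOUTH := by
  simp [pvTilt, tilt_rocks_to_direction, pv_line_eq, Function.comp_def]
theorem pv_tilt_E (m : List String) : pvTilt m false false = tilt_rocks_to_direction m Directions.EAST := by
  simp [pvTilt, tilt_rocks_to_direction, pv_line_eq]

theorem pv_step_eq (cur : List String) :
    tilt_rocks_to_direction (tilt_rocks_to_direction (tilt_rocks_to_direction
      (tilt_rocks_to_direction cur Directions.NORTH) Directions.WEST) Directions.SOUTH) Directions.EAST
    = pvCycle cur := by
  rw [pvCycle, pv_tilt_N, pv_tilt_W, pv_tilt_S, pv_tilt_E]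

theorem pv_foldl_const_iterate {α β : Type} (f : β → β) : ∀ (l : List α) (x : β),
    l.foldl (fun c _ => f c) x = f^[l.length] x := by
  intro l
  induction l with
  | nil => simp
  | cons h t ih => intro x; simp [ih, Function.iterate_succ_apply]

theorem pv_ctc_iter (n : Int) (m : List String) :
    complete_tilt_cycles m n = pvCycle^[n.toNat] m := by
  rw [complete_tilt_cycles]
  have h : (fun (cur : List String) (_ : Int) => tilt_rocks_to_direction (tilt_rocks_to_direction
      (tilt_rocks_to_direction (tilt_rocks_to_direction cur Directions.NORTH) Directions.WEST)
      Directions.SOUTH) Directions.EAST) = fun cur _ => pvCycle cur := by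
    funext cur x; exact pv_step_eq cur
  rw [h, pv_foldl_const_iterate, PySem.List.length_pyRange_one]
  norm_num

theorem pv_load_eq (m : List String) : calculate_load m = pvLoad m := by
  rw [calculate_load, pvLoad, PySem.List.foldl_add]
  simp [pv_count_rocks_eq, pv_count_single]

theorem pv_orbit_eq : ∀ (n : Nat) (cur : List String),
    pvOrbit n cur = (List.range n).map (fun t => pvCycle^[t+1] cur) := by
  intro n
  induction n with
  | zero => intro cur; rfl
  | succ k ih =>
    intro cur
    rw [pvOrbit, ih (pvCycle cur), List.range_succ_eq_map]
    rw [List.map_cons, List.map_map]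
    congr 1

theorem pv_repeat_extract : ∀ (l : List (List String)), pvHasRepeat l = true →
    ∃ i j, i < j ∧ j < l.length ∧ l[i]? = l[j]? := by
  intro l
  induction l with
  | nil => simp [pvHasRepeat]
  | cons x xs ih =>
    intro h
    rw [pvHasRepeat, Bool.or_eq_true] at h
    rcases h with h | h
    · have hx : x ∈ xs := by simpa using h
      obtain ⟨t, ht, hxt⟩ := List.mem_iff_getElem.mp hx
      exact ⟨0, t+1, by omega, by simpa using ht, by simp [List.getElem?_eq_getElem ht, hxt]⟩
    · obtain ⟨i, j, hij, hj, he⟩ := ih h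
      exact ⟨i+1, j+1, by omega, by simpa using hj, by simpa using he⟩

theorem pv_repeat1000 (m : List String) (h : pvHasRepeat (pvOrbit 1000 m) = true) :
    ∃ b, b ≤ 1000 ∧ ∃ a, 1 ≤ a ∧ a < b ∧ pvCycle^[a] m = pvCycle^[b] m := by
  obtain ⟨i, j, hij, hj, he⟩ := pv_repeat_extract _ h
  rw [pv_orbit_eq 1000 m] at hj
  rw [pv_orbit_eq 1000 m] at he
  rw [List.length_map, List.length_range] at hj
  rw [List.getElem?_map, List.getElem?_map, List.getElem?_range (by omega : i < 1000),
    List.getElem?_range hj] at he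
  simp only [Option.map_some, Option.some_inj] at he
  exact ⟨j+1, by omega, i+1, by omega, by omega, he⟩

-- ====== periodicity of the orbit ======
theorem pv_step_shift (x : List String) (a p : Nat) (h : pvCycle^[a+p] x = pvCycle^[a] x)
    (j : Nat) : pvCycle^[a+p+j] x = pvCycle^[a+j] x := by
  rw [show a+p+j = j+(a+p) by omega, Function.iterate_add_apply, h,
    ← Function.iterate_add_apply, show j+a = a+j by omega]

theorem pv_shift_mul (x : List String) (a p : Nat) (h : pvCycle^[a+p] x = pvCycle^[a] x) :
    ∀ (k j : Nat), pvCycle^[a+j+k*p] x = pvCycle^[a+j] x := by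
  intro k
  induction k with
  | zero => intro j; simp
  | succ n ih =>
    intro j
    have := pv_step_shift x a p h (j + n*p)
    rw [show a+j+(n+1)*p = a+p+(j+n*p) by ring]
    rw [this, show a+(j+n*p) = a+j+n*p by ring, ih j]

theorem pv_periodic (x : List String) (a p : Nat) (_hp : 0 < p)
    (h : pvCycle^[a+p] x = pvCycle^[a] x) :
    ∀ m n, a ≤ m → a ≤ n → m % p = n % p → pvCycle^[m] x = pvCycle^[n] x := by
  have key : ∀ m n, a ≤ m → m ≤ n → m % p = n % p → pvCycle^[m] x = pvCycle^[n] x := by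
    intro m n ham hmn hmod
    have hdvd : p ∣ n - m := (Nat.modEq_iff_dvd' hmn).mp hmod
    obtain ⟨k, hk⟩ := hdvd
    rw [Nat.mul_comm] at hk
    have hn : n = a + (m - a) + k * p := by omega
    rw [hn, pv_shift_mul x a p h k (m - a), show a + (m - a) = m by omega]
  intro m n ham han hmod
  rcases le_total m n with hle | hle
  · exact key m n ham hle hmod
  · exact (key n m han hle hmod.symm).symm

theorem pv_int_addmod (a c p : Int) : (a % p + c) % p = (a + c) % p := by
  conv_rhs => rw [Int.add_emod]
  rw [Int.add_emod (a % p) c, Int.emod_emod_of_dvd a dvd_rfl]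

-- ====== A's loop returns the load after 10^9 cycles ======
theorem pv_found_branch (m : List String) (k j : Nat) (hk : k < 1000) (hjk : j < k)
    (horb : pvCycle^[j+1] m = pvCycle^[k+1] m) :
    calculate_load (complete_tilt_cycles (pvCycle^[k+1] m)
        (PySem.Int.mod (1000000000 - (k:Int) - 1) ((k:Int) - (j:Int))))
    = pvLoad (pvCycle^[1000000000] m) := by
  have hp : (0:Int) < (k:Int) - (j:Int) := by omega
  rw [PySem.Int.mod_eq_emod_of_pos hp]
  set r := (1000000000 - (k:Int) - 1) % ((k:Int) - (j:Int)) with hr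
  have hr0 : 0 ≤ r := Int.emod_nonneg _ (by omega)
  have hrlt : r < (k:Int) - (j:Int) := Int.emod_lt_of_pos _ hp
  rw [pv_ctc_iter, ← Function.iterate_add_apply, pv_load_eq]
  set p := k - j with hpn
  have hpp : 0 < p := by omega
  have hper : pvCycle^[(j+1)+p] m = pvCycle^[j+1] m := by
    rw [show (j+1)+p = k+1 by omega]; exact horb.symm
  apply congrArg
  apply pv_periodic m (j+1) p hpp hper _ _ (by omega) (by omega)
  -- residues: (r.toNat + (k+1)) % p = 1000000000 % p
  have hpInt : ((k:Int) - (j:Int)) = ((p:Nat):Int) := by omega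
  have hInt : ((r.toNat + (k+1) : Nat) : Int) % ((p:Nat) : Int) = ((1000000000 : Nat) : Int) % ((p:Nat) : Int) := by
    push_cast
    rw [Int.toNat_of_nonneg hr0, hr, hpInt, pv_int_addmod]
    congr 1
    ring
  zify
  push_cast at hInt ⊢
  omega

theorem pv_loopA_val (m : List String) : ∀ (fuel k : Nat), k + fuel ≤ 1000 →
    (∃ b, b ≤ k + fuel ∧ ∃ a, 1 ≤ a ∧ a < b ∧ pvCycle^[a] m = pvCycle^[b] m) →
    (∀ i j, i < j → j < k → pvCycle^[i+1] m ≠ pvCycle^[j+1] m) →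
    analyzeLoopA fuel (k:Int) (pvCycle^[k] m) ((List.range k).map (fun t => pvCycle^[t+1] m))
      = pvLoad (pvCycle^[1000000000] m) := by
  intro fuel
  induction fuel with
  | zero =>
    intro k _ hex hinj
    exfalso
    obtain ⟨b, hb, a, ha1, hab, he⟩ := hex
    exact hinj (a-1) (b-1) (by omega) (by omega)
      (by rw [show a-1+1 = a by omega, show b-1+1 = b by omega]; exact he)
  | succ fuel ih =>
    intro k hfk hex hinj
    have hcur : pvCycle (pvCycle^[k] m) = pvCycle^[k+1] m :=
      (Function.iterate_succ_apply' pvCycle k m).symm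
    have hnm : complete_tilt_cycles (pvCycle^[k] m) 1 = pvCycle^[k+1] m := by
      rw [pv_ctc_iter 1 (pvCycle^[k] m), show ((1:Int).toNat) = 1 from rfl,
        Function.iterate_one]
      exact hcur
    rw [analyzeLoopA]
    simp only [hnm]
    by_cases hmem : pvCycle^[k+1] m ∈ (List.range k).map (fun t => pvCycle^[t+1] m)
    · rw [if_pos hmem]
      have hjs : ∃ j, PySem.List.index? ((List.range k).map (fun t => pvCycle^[t+1] m)) (pvCycle^[k+1] m) = some j := by
        have := (PySem.List.index?_isSome_iff (xs := (List.range k).map (fun t => pvCycle^[t+1] m)) (v := pvCycle^[k+1] m)).mpr hmem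
        exact Option.isSome_iff_exists.mp this
      obtain ⟨j, hj⟩ := hjs
      obtain ⟨hkj, horbj, _⟩ := PySem.List.getElem_of_index?_eq_some hj
      rw [List.length_map, List.length_range] at hkj
      have horb : pvCycle^[j+1] m = pvCycle^[k+1] m := by
        simpa using horbj
      rw [hj]
      simp only [Option.getD_some]
      exact pv_found_branch m k j (by omega) hkj horb
    · rw [if_neg hmem]
      have horb1 : ((List.range k).map (fun t => pvCycle^[t+1] m)) ++ [pvCycle^[k+1] m]
          = (List.range (k+1)).map (fun t => pvCycle^[t+1] m) := by
        rw [List.range_succ, List.map_append]; rfl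
      have hca : ((k:Int) + 1) = ((k+1 : Nat) : Int) := by push_cast; ring
      rw [horb1, hca, show pvCycle^[k+1] m = pvCycle^[(k+1)] m from rfl]
      apply ih (k+1) (by omega)
      · obtain ⟨b, hb, rest⟩ := hex
        exact ⟨b, by omega, rest⟩
      · intro i j hij hj
        rcases Nat.lt_or_ge j k with hjk | hjk
        · exact hinj i j hij hjk
        · have hjeq : j = k := by omega
          subst hjeq
          intro he
          exact hmem (by
            rw [← he]
            exact List.mem_map.mpr ⟨i, List.mem_range.mpr (by omega), rfl⟩)

-- ====== B's Floyd loop returns the load after 10^9 cycles ======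
theorem pv_floyd_meets (m : List String) : ∀ (fuel t : Nat), 1 ≤ t →
    (∃ u, t ≤ u ∧ u ≤ t + fuel ∧ pvCycle^[u] m = pvCycle^[2*u] m) →
    ∃ s, t ≤ s ∧ s ≤ t + fuel ∧ pvCycle^[s] m = pvCycle^[2*s] m ∧
      pvFloyd fuel (t:Int) (pvCycle^[t] m) (pvCycle^[2*t] m) = ((s:Int), pvCycle^[s] m) := by
  intro fuel
  induction fuel with
  | zero =>
    intro t ht hex
    obtain ⟨u, hu1, hu2, hue⟩ := hex
    have : u = t := by omega
    subst this
    exact ⟨u, le_rfl, le_rfl, hue, by rw [pvFloyd]⟩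
  | succ fuel ih =>
    intro t ht hex
    rw [pvFloyd]
    by_cases heq : pvCycle^[t] m = pvCycle^[2*t] m
    · rw [if_pos heq]
      exact ⟨t, le_rfl, by omega, heq, rfl⟩
    · rw [if_neg heq]
      have hstep1 : pvCycle (pvCycle^[t] m) = pvCycle^[t+1] m :=
        (Function.iterate_succ_apply' pvCycle t m).symm
      have hstep2 : pvCycle (pvCycle (pvCycle^[2*t] m)) = pvCycle^[2*(t+1)] m := by
        rw [show 2*(t+1) = (2*t)+1+1 by ring, Function.iterate_succ_apply',
          Function.iterate_succ_apply']
      have hex' : ∃ u, t+1 ≤ u ∧ u ≤ (t+1) + fuel ∧ pvCycle^[u] m = pvCycle^[2*u] m := by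
        obtain ⟨u, hu1, hu2, hue⟩ := hex
        have hut : u ≠ t := fun h => heq (h ▸ hue)
        exact ⟨u, by omega, by omega, hue⟩
      obtain ⟨s, hs1, hs2, hse, hrun⟩ := ih (t+1) (by omega) hex'
      refine ⟨s, by omega, by omega, hse, ?_⟩
      rw [hstep1, hstep2, show ((t:Int)+1) = ((t+1 : Nat) : Int) by push_cast; ring]
      exact hrun

theorem pv_alt_val (m : List String)
    (hex : ∃ b, b ≤ 1000 ∧ ∃ a, 1 ≤ a ∧ a < b ∧ pvCycle^[a] m = pvCycle^[b] m) :
    analyze_rock_maps_alt m = pvLoad (pvCycle^[1000000000] m) := by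
  -- produce a meeting point u ≤ 2001 with pvCycle^[u] = pvCycle^[2u]
  obtain ⟨b, hb, a, ha1, hab, he⟩ := hex
  set p := b - a with hp
  have hpp : 0 < p := by omega
  have hper : pvCycle^[a+p] m = pvCycle^[a] m := by
    rw [show a+p = b by omega]; exact he.symm
  obtain ⟨q, r, hqr, hrlt⟩ : ∃ q r, a + p - 1 = q * p + r ∧ r < p := by
    refine ⟨(a+p-1)/p, (a+p-1)%p, ?_, Nat.mod_lt _ hpp⟩
    rw [Nat.mul_comm]
    exact (Nat.div_add_mod _ _).symm
  set u := q * p with hu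
  have hau : a ≤ u := by omega
  have hu1 : 1 ≤ u := by omega
  have hub : u ≤ a + p := by omega
  have hue : pvCycle^[u] m = pvCycle^[2*u] m := by
    apply pv_periodic m a p hpp hper u (2*u) hau (by omega)
    simp [hu, Nat.mul_mod_left, show 2*(q*p) = (2*q)*p by ring]
  obtain ⟨s, hs1, hs2, hse, hrun⟩ := pv_floyd_meets m 2000 1 le_rfl
    ⟨u, hu1, by omega, hue⟩
  simp only [Nat.cast_one] at hrun
  rw [analyze_rock_maps_alt]
  rw [show pvCycle (pvCycle m) = pvCycle^[2*1] m from rfl,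
    show pvCycle m = pvCycle^[1] m from rfl, hrun]
  -- the remainder loop
  have hsp : (0:Int) < (s:Int) := by omega
  rw [PySem.Int.mod_eq_emod_of_pos hsp]
  set r2 := (1000000000 - (s:Int)) % (s:Int) with hr2
  have hr20 : 0 ≤ r2 := Int.emod_nonneg _ (by omega)
  have hr2lt : r2 < (s:Int) := Int.emod_lt_of_pos _ hsp
  rw [pv_foldl_const_iterate, PySem.List.length_pyRange_one, sub_zero, ← Function.iterate_add_apply]
  apply congrArg
  have hperS : pvCycle^[s+s] m = pvCycle^[s] m := by
    rw [show s+s = 2*s by ring]; exact hse.symm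
  apply pv_periodic m s s (by omega) hperS _ _ (by omega) (by omega)
  -- residues mod s
  have hInt : ((r2.toNat + s : Nat) : Int) % ((s:Nat) : Int) = ((1000000000 : Nat) : Int) % ((s:Nat) : Int) := by
    push_cast
    rw [Int.toNat_of_nonneg hr20, hr2, pv_int_addmod]
    congr 1
    ring
  zify
  push_cast at hInt ⊢
  omega

-- ===== VERDICT (by name: the statement is the Claim_ definition above) =====
theorem analyze_rock_maps_spec : Claim_equal_analyze_rock_maps := by
  intro m hdom hpre
  obtain ⟨-, -, hrep⟩ := hpre
  show analyze_rock_maps m = analyze_rock_maps_alt m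
  have hex := pv_repeat1000 m hrep
  have hex' : ∃ b, b ≤ 0 + 1000 ∧ ∃ a, 1 ≤ a ∧ a < b ∧ pvCycle^[a] m = pvCycle^[b] m := by
    simpa using hex
  rw [analyze_rock_maps, pv_alt_val m hex]
  have h := pv_loopA_val m 1000 0 (by omega) hex'
    (fun i j _ hj => absurd hj (Nat.not_lt_zero j))
  simp only [Function.iterate_zero, id_eq, List.range_zero, List.map_nil, Nat.cast_zero] at h
  exact h
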